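-- pv_equiv track=rewrite | github.com/JeremyZ01/The-wall-is-you | Projet_2_jeremy_zhang/laby.py | taille_donjon
-- ===== SOURCE A (Python) =====
-- def taille_donjon(maps):
--     """
--     Détermine la taille du donjon à partir de la carte.
--     """
--     ligne = 0
--     colonne = 0
--     for i in range(len(maps)):
--         if maps[i] == '\n':
--             ligne += 1
--         if ligne == 0:
--             colonne+=1
--         elif maps[i] == 'A':
--             return ligne,colonne
-- ===== SOURCE B (Python) =====
-- def taille_donjon(maps):
--     """
--     Détermine la taille du donjon à partir de la carte.
--     """
--     lines = maps.split('\n')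
--     colonne = len(lines[0])
--     for idx, line in enumerate(lines[1:], 1):
--         if 'A' in line:
--             return idx, colonne
-- ===== Notes on version B (the rewrite author's own statement) =====
-- stated objective: idiomatic
-- what changed: Replaces A's per-character scan with a running newline counter and column counter by splitting the map into lines once, taking len(lines[0]) as the column count, and scanning the remaining lines for the first one containing 'A'.
-- outside the precondition, e.g. on taille_donjon('ab.c'): A returns None, B returns None; on taille_donjon('A..\n...'): A returns None, B returns None; on taille_donjon('A'): A returns None, B returns None
import Mathlib
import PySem

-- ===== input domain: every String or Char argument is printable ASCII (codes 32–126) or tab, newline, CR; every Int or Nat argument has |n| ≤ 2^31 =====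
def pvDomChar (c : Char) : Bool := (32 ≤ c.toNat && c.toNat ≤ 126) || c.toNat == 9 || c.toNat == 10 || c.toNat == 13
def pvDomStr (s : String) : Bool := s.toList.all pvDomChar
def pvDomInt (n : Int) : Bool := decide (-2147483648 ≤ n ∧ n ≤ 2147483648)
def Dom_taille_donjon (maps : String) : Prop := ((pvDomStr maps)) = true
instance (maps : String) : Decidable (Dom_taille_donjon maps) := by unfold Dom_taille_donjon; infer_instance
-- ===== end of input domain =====

-- B replaces A's per-character scan (newline counter + column counter) by a per-line traversal:
-- split on '\n', take len(lines[0]) as the column count, and return the index of the first later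
-- line containing 'A' (objective: idiomatic / simpler; no speed claim).

-- ===== PORT A =====
-- A's for-loop over range(len(maps)) with state (ligne, colonne) and an early return;
-- `none` is Python's implicit None (no return), excluded by Pre_.
def tailleA_loop : List Char → Int → Int → Option (Int × Int)
  | [], _, _ => none
  | c :: rest, ligne, colonne =>
    let ligne' := if c = '\n' then ligne + 1 else ligne
    if ligne' = 0 then tailleA_loop rest ligne' (colonne + 1)
    else if c = 'A' then some (ligne', colonne)
    else tailleA_loop rest ligne' colonne

-- Python A returns None (no tuple) when no 'A' follows the first newline; Pre_ excludes that,
-- so the (0, 0) default is never claimed about.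
def taille_donjon (maps : String) : Int × Int :=
  (tailleA_loop maps.toList 0 0).getD (0, 0)

-- ===== PORT B =====
-- the `for idx, line in enumerate(lines[1:], 1)` loop of Source B
def tailleB_loop : List (List Char) → Int → Option Int
  | [], _ => none
  | l :: rest, idx => if l.contains 'A' then some idx else tailleB_loop rest (idx + 1)

def taille_donjon_alt (maps : String) : Int × Int :=
  let lines := maps.toList.splitOn '\n'
  let colonne : Int := (lines.headD []).length
  match tailleB_loop (lines.drop 1) 1 with
  | some idx => (idx, colonne)
  | none => (0, 0)

-- ===== PRECONDITION & SPEC =====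
-- Pre_ excludes exactly the maps with no 'A' in any line after the first, where Python A falls
-- off its loop and returns None (not an (int, int) pair).
def Pre_taille_donjon (maps : String) : Prop :=
  ((maps.toList.splitOn '\n').drop 1).any (fun l => l.contains 'A') = true
instance (maps : String) : Decidable (Pre_taille_donjon maps) := by unfold Pre_taille_donjon; infer_instance

def pvWitness_taille_donjon : String := "##.\n.A#"

def Spec_taille_donjon (maps : String) (out : Int × Int) : Prop := out = taille_donjon_alt maps
instance (maps : String) (out : Int × Int) : Decidable (Spec_taille_donjon maps out) := by unfold Spec_taille_donjon; infer_instance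

-- ===== CLAIM (what is proved, stated in full; the proofs are below) =====
def Claim_equal_taille_donjon : Prop := ∀ (maps : String), Dom_taille_donjon maps → Pre_taille_donjon maps → Spec_taille_donjon maps (taille_donjon maps)

-- ===== LEMMAS AND PROOFS =====

-- splitOn never returns the empty list
theorem splitOn_ne_nil (cs : List Char) : cs.splitOn '\n' ≠ [] := by
  simp only [List.splitOn]
  exact List.splitOnP_ne_nil _ cs

-- splitOn on a separator-free list
theorem splitOn_of_not_mem (cs : List Char) (h : '\n' ∉ cs) : cs.splitOn '\n' = [cs] := by
  induction cs with
  | nil => rfl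
  | cons a t ih =>
    have ha : a ≠ '\n' := fun hc => h (hc ▸ List.mem_cons_self)
    have ht := ih (fun hc => h (List.mem_cons_of_mem _ hc))
    simp only [List.splitOn] at *
    simp [List.splitOnP_cons, ha, ht]

-- splitOn peels off the first (separator-free) segment
theorem splitOn_append_cons (pre post : List Char) (hpre : '\n' ∉ pre) :
    (pre ++ '\n' :: post).splitOn '\n' = pre :: post.splitOn '\n' := by
  induction pre with
  | nil => simp [List.splitOn, List.splitOnP_cons]
  | cons a t ih =>
    have ha : a ≠ '\n' := fun hc => hpre (hc ▸ List.mem_cons_self)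
    have ht := ih (fun hc => hpre (List.mem_cons_of_mem _ hc))
    simp only [List.splitOn] at *
    simp [List.splitOnP_cons, ha, ht]

-- phase ligne = 0: a newline-free prefix only advances colonne
theorem loopA_phase0 (l : List Char) (rest : List Char) (c : Int) (hl : '\n' ∉ l) :
    tailleA_loop (l ++ rest) 0 c = tailleA_loop rest 0 (c + l.length) := by
  induction l generalizing c with
  | nil => simp
  | cons a t ih =>
    have ha : a ≠ '\n' := fun h => hl (h ▸ List.mem_cons_self)
    have ht : '\n' ∉ t := fun h => hl (List.mem_cons_of_mem _ h)
    simp only [List.cons_append, tailleA_loop, if_neg ha, ih _ ht]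
    norm_num
    ring_nf

-- phase ligne ≥ 1: the char scan agrees with B's per-line scan over splitOn
theorem loopA_phase1 (cs : List Char) (n col : Int) (hn : 1 ≤ n) :
    tailleA_loop cs n col =
      (tailleB_loop (cs.splitOn '\n') n).map (fun i => (i, col)) := by
  induction cs generalizing n with
  | nil => simp [tailleA_loop, List.splitOn, tailleB_loop]
  | cons a t ih =>
    by_cases hnl : a = '\n'
    · subst hnl
      have h1 : ('\n' :: t).splitOn '\n' = [] :: t.splitOn '\n' := by
        simp [List.splitOn, List.splitOnP_cons]
      rw [h1]
      have hne : ¬ (n + 1 = 0) := by omega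
      simp [tailleA_loop, tailleB_loop, hne]
      exact ih (n + 1) (by omega)
    · obtain ⟨h0, tl, hsplit⟩ : ∃ h0 tl, t.splitOn '\n' = h0 :: tl := by
        rcases hq : t.splitOn '\n' with _ | ⟨h0, tl⟩
        · exact absurd hq (splitOn_ne_nil t)
        · exact ⟨h0, tl, rfl⟩
      have h1 : (a :: t).splitOn '\n' = (a :: h0) :: tl := by
        simp only [List.splitOn, List.splitOnP_cons] at *
        simp [hnl, hsplit]
      rw [h1]
      have hne : ¬ (n = 0) := by omega
      simp only [tailleA_loop, if_neg hnl, if_neg hne]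
      by_cases hA : a = 'A'
      · subst hA
        simp [tailleB_loop]
      · have hA' : ¬ ('A' = a) := fun h => hA h.symm
        simp only [if_neg hA, tailleB_loop, List.contains_cons]
        rw [ih n hn, hsplit]
        by_cases hc : h0.contains 'A' = true
        · simp [tailleB_loop, hA']
        · simp only [Bool.not_eq_true] at hc
          simp [tailleB_loop, hA']

-- the main equation: the two ports agree on EVERY string
theorem ports_agree (maps : String) : taille_donjon maps = taille_donjon_alt maps := by
  unfold taille_donjon taille_donjon_alt
  by_cases hnl : '\n' ∈ maps.toList
  · obtain ⟨pre, post, heq, hpre⟩ := List.eq_append_cons_of_mem hnl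
    rw [heq, splitOn_append_cons pre post hpre, loopA_phase0 pre _ 0 hpre]
    have hstep : tailleA_loop ('\n' :: post) 0 ((0 : Int) + pre.length)
        = tailleA_loop post 1 ((0 : Int) + pre.length) := by
      simp [tailleA_loop]
    rw [hstep, loopA_phase1 post 1 _ (by omega)]
    rcases h : tailleB_loop (post.splitOn '\n') 1 with _ | i <;> simp [h]
  · rw [splitOn_of_not_mem maps.toList hnl]
    have h0 : tailleA_loop (maps.toList ++ []) 0 0 = none := by
      rw [loopA_phase0 maps.toList [] 0 hnl]; rfl
    rw [List.append_nil] at h0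
    rw [h0]
    simp [tailleB_loop]

-- ===== VERDICT (by name: the statement is the Claim_ definition above) =====
theorem taille_donjon_spec : Claim_equal_taille_donjon := by
  intro maps _ _
  unfold Spec_taille_donjon
  exact ports_agree maps
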